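-- pv_equiv track=rewrite | github.com/eliottcassidy2000/math | 04-computation/triangle_cone_hypercube_deep_89b.py | get_edge_index
-- ===== SOURCE A (Python) =====
-- def get_edge_index(n, i, j):
--     if i > j:
--         i, j = j, i
--     idx = 0
--     for a in range(n):
--         for b in range(a+1, n):
--             if a == i and b == j:
--                 return idx
--             idx += 1
--     return -1
-- ===== SOURCE B (Python) =====
-- def get_edge_index(n, i, j):
--     if i > j:
--         i, j = j, i
--     if 0 <= i < j < n:
--         return i * (2 * n - i - 1) // 2 + (j - i - 1)
--     return -1
-- ===== Notes on version B (the rewrite author's own statement) =====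
-- stated objective: faster
-- what changed: Replaced the quadratic double loop over all lexicographic pairs by a closed-form arithmetic formula with a validity check.
import Mathlib
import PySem

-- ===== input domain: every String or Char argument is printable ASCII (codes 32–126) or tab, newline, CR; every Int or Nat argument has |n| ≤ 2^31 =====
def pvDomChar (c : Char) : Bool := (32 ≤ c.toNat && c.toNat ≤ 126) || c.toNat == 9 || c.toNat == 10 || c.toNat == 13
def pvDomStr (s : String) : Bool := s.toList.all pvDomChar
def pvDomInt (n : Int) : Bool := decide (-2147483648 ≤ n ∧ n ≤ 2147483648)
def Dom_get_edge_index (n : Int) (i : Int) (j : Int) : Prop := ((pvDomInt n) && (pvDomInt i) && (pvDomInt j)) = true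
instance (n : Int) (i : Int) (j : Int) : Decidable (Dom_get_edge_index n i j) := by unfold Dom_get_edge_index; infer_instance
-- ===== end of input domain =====

-- B replaces A's quadratic double loop by a closed-form arithmetic formula with a validity check (objective: faster).

-- ===== PORT A =====
-- inner loop 'for b in range(a+1, n)': .inl r = early return r, .inr idx = loop finished with counter idx
def pvInner (i j a : Int) : List Int → Int → Int ⊕ Int
  | [], idx => .inr idx
  | b :: bs, idx => if a = i ∧ b = j then .inl idx else pvInner i j a bs (idx + 1)

-- outer loop 'for a in range(n)'
def pvOuter (n i j : Int) : List Int → Int → Int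
  | [], _ => -1
  | a :: as, idx =>
      match pvInner i j a (PySem.List.pyRange (a + 1) n 1) idx with
      | .inl r => r
      | .inr idx' => pvOuter n i j as idx'

def get_edge_index (n : Int) (i : Int) (j : Int) : Int :=
  let p := if i > j then (j, i) else (i, j)
  pvOuter n p.1 p.2 (PySem.List.pyRange 0 n 1) 0

-- ===== PORT B =====
def get_edge_index_alt (n : Int) (i : Int) (j : Int) : Int :=
  let p := if i > j then (j, i) else (i, j)
  if 0 ≤ p.1 ∧ p.1 < p.2 ∧ p.2 < n then
    PySem.Int.floordiv (p.1 * (2 * n - p.1 - 1)) 2 + (p.2 - p.1 - 1)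
  else -1

-- ===== PRECONDITION & SPEC =====
def Spec_get_edge_index (n : Int) (i : Int) (j : Int) (out : Int) : Prop := out = get_edge_index_alt n i j
instance (n : Int) (i : Int) (j : Int) (out : Int) : Decidable (Spec_get_edge_index n i j out) := by unfold Spec_get_edge_index; infer_instance

-- ===== CLAIM (what is proved, stated in full; the proofs are below) =====
def Claim_equal_get_edge_index : Prop := ∀ (n : Int) (i : Int) (j : Int), Dom_get_edge_index n i j → Spec_get_edge_index n i j (get_edge_index n i j)

-- ===== LEMMAS AND PROOFS =====

-- number of pairs (a,b), s ≤ a < i, a < b < n, as a sum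
def pvC (n i s : Int) : Int := ((PySem.List.pyRange s i 1).map (fun a => n - a - 1)).sum

theorem pvC_step (n i s : Int) (h : s < i) : pvC n i s = (n - s - 1) + pvC n i (s + 1) := by
  unfold pvC
  rw [PySem.List.pyRange_one_cons h]
  simp

theorem pvC_double (n i s : Int) (h : s ≤ i) : 2 * pvC n i s = (i - s) * (2 * n - s - i - 1) := by
  obtain ⟨m, hm⟩ : ∃ m : Nat, (m : Int) = i - s := ⟨(i - s).toNat, by omega⟩
  induction m generalizing s with
  | zero =>
      have hs : i = s := by omega
      subst hs
      simp [pvC]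
  | succ m ih =>
      have hlt : s < i := by omega
      have ih' := ih (s + 1) (by omega) (by omega)
      rw [pvC_step n i s hlt]
      linear_combination ih'

theorem pvInner_spec (i j a n s idx : Int) :
    pvInner i j a (PySem.List.pyRange s n 1) idx =
      if a = i ∧ s ≤ j ∧ j < n then .inl (idx + (j - s)) else .inr (idx + max (n - s) 0) := by
  obtain ⟨m, hm⟩ : ∃ m : Nat, m = (n - s).toNat := ⟨(n - s).toNat, rfl⟩
  induction m generalizing s idx with
  | zero =>
      have hns : n ≤ s := by omega
      rw [PySem.List.pyRange_one_eq_nil hns]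
      have : ¬ (a = i ∧ s ≤ j ∧ j < n) := by rintro ⟨_, h2, h3⟩; omega
      simp [pvInner, this]
      omega
  | succ m ih =>
      have hsn : s < n := by omega
      rw [PySem.List.pyRange_one_cons hsn]
      show (if a = i ∧ s = j then Sum.inl idx else pvInner i j a (PySem.List.pyRange (s+1) n 1) (idx + 1)) = _
      rw [ih (s + 1) (idx + 1) (by omega)]
      by_cases h1 : a = i ∧ s = j
      · obtain ⟨ha, hsj⟩ := h1
        subst ha; subst hsj
        simp [hsn]
      · by_cases h2 : a = i ∧ s + 1 ≤ j ∧ j < n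
        · have h3 : a = i ∧ s ≤ j ∧ j < n := ⟨h2.1, by omega, h2.2.2⟩
          simp only [if_neg h1, if_pos h2, if_pos h3]
          congr 1
          omega
        · have h3 : ¬ (a = i ∧ s ≤ j ∧ j < n) := by
            rintro ⟨ha, hsj, hjn⟩
            rcases eq_or_lt_of_le hsj with he | hlt
            · exact h1 ⟨ha, he⟩
            · exact h2 ⟨ha, by omega, hjn⟩
          simp only [if_neg h1, if_neg h2, if_neg h3]
          congr 1
          omega

theorem pvOuter_spec (n i j s idx : Int) :
    pvOuter n i j (PySem.List.pyRange s n 1) idx =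
      if s ≤ i ∧ i < j ∧ j < n then idx + pvC n i s + (j - i - 1) else -1 := by
  obtain ⟨m, hm⟩ : ∃ m : Nat, m = (n - s).toNat := ⟨(n - s).toNat, rfl⟩
  induction m generalizing s idx with
  | zero =>
      have hns : n ≤ s := by omega
      rw [PySem.List.pyRange_one_eq_nil hns]
      have : ¬ (s ≤ i ∧ i < j ∧ j < n) := by rintro ⟨h1, h2, h3⟩; omega
      simp [pvOuter, this]
  | succ m ih =>
      have hsn : s < n := by omega
      rw [PySem.List.pyRange_one_cons hsn]
      simp only [pvOuter]
      rw [pvInner_spec]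
      by_cases c1 : s = i ∧ s + 1 ≤ j ∧ j < n
      · obtain ⟨hsi, hsj, hjn⟩ := c1
        rw [if_pos ⟨hsi, hsj, hjn⟩]
        show idx + (j - (s + 1)) = _
        rw [if_pos (show s ≤ i ∧ i < j ∧ j < n from ⟨le_of_eq hsi, by omega, hjn⟩)]
        have h0 : pvC n i s = 0 := by
          rw [hsi]
          simp [pvC, PySem.List.pyRange_one_eq_nil (le_refl i)]
        omega
      · rw [if_neg c1]
        show pvOuter n i j (PySem.List.pyRange (s + 1) n 1) (idx + max (n - (s + 1)) 0) = _
        rw [ih (s + 1) (idx + max (n - (s + 1)) 0) (by omega)]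
        rcases eq_or_ne s i with hsi | hsi
        · -- s = i but (i, j) is not a valid pair: both sides are -1
          rw [if_neg (by rintro ⟨h1, _⟩; omega)]
          rw [if_neg (by rintro ⟨_, h2, h3⟩; exact c1 ⟨hsi, by omega, h3⟩)]
        · by_cases c3 : s + 1 ≤ i ∧ i < j ∧ j < n
          · rw [if_pos c3, if_pos ⟨by omega, c3.2⟩]
            rw [pvC_step n i s (by omega)]
            omega
          · rw [if_neg c3]
            rw [if_neg (by rintro ⟨h1, h2, h3⟩; exact c3 ⟨by omega, h2, h3⟩)]

-- ===== VERDICT (by name: the statement is the Claim_ definition above) =====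
theorem get_edge_index_spec : Claim_equal_get_edge_index := by
  intro n i j _
  unfold Spec_get_edge_index get_edge_index get_edge_index_alt
  rw [pvOuter_spec]
  by_cases hc : 0 ≤ (if i > j then (j, i) else (i, j)).1 ∧
      (if i > j then (j, i) else (i, j)).1 < (if i > j then (j, i) else (i, j)).2 ∧
      (if i > j then (j, i) else (i, j)).2 < n
  · rw [if_pos hc, if_pos hc]
    have hd : 2 * pvC n (if i > j then (j, i) else (i, j)).1 0 =
        (if i > j then (j, i) else (i, j)).1 *
          (2 * n - (if i > j then (j, i) else (i, j)).1 - 1) := by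
      linear_combination pvC_double n (if i > j then (j, i) else (i, j)).1 0 hc.1
    rw [PySem.Int.floordiv_eq_ediv_of_pos (by norm_num), ← hd]
    omega
  · rw [if_neg hc, if_neg hc]
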